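-- pv_equiv track=rewrite | github.com/Enzu83/advent-of-code | year-2021/12/puzzle2.py | is_second_visit_available
-- ===== SOURCE A (Python) =====
-- def is_big_cave(node):
--     for char in node:
--         if char.islower():
--             return False
--
--     return True
--
-- def is_second_visit_available(path):
--     small_caves_visit = {}
--
--     for cave in path:
--         if is_big_cave(cave) == False and cave not in {'start', 'end'}:
--             if cave not in small_caves_visit:
--                 small_caves_visit[cave] = 1
--             else:
--                 small_caves_visit[cave] += 1
--
--     for cave in small_caves_visit:
--         if small_caves_visit[cave] == 2:
--             return False
--
--     return True
-- ===== SOURCE B (Python) =====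
-- def is_second_visit_available(path):
--     rel = sorted(c for c in path
--                  if c not in ('start', 'end') and any(ch.islower() for ch in c))
--     while rel:
--         x = rel[0]
--         k = 1
--         while k < len(rel) and rel[k] == x:
--             k += 1
--         if k == 2:
--             return False
--         rel = rel[k:]
--     return True
-- ===== Notes on version B (the rewrite author's own statement) =====
-- stated objective: alternative
-- what changed: Replaces A's single-pass counting dictionary plus value scan by sort-then-scan: sort the relevant small caves and walk the sorted list run by run, returning False when a run has length exactly 2.
import Mathlib
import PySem

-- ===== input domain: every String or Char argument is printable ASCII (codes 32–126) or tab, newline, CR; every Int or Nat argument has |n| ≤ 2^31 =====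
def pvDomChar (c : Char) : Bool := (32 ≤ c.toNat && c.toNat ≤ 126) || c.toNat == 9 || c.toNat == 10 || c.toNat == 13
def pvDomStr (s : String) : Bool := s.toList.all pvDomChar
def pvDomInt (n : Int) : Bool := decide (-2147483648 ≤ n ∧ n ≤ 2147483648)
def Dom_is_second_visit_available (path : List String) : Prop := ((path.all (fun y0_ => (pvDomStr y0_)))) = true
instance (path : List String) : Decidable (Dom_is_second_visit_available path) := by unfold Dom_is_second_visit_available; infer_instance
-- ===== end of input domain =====

-- B replaces A's counting dictionary + value scan by sort-then-scan over the relevant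
-- caves: walk the sorted list run by run, False iff some run has length exactly 2
-- (objective: alternative algorithm, same behaviour).

-- ===== PORT A =====
-- 'for char in node: if char.islower(): return False / return True'
def pyIsBigCaveLoop : List Char → Bool
  | [] => true
  | c :: rest => if PySem.Chars.islower c then false else pyIsBigCaveLoop rest

def is_big_cave (node : String) : Bool := pyIsBigCaveLoop node.toList

-- 'for cave in small_caves_visit: if small_caves_visit[cave] == 2: return False / return True'
def pyCheckLoop : List (String × Int) → Bool
  | [] => true
  | (_, v) :: rest => if v == 2 then false else pyCheckLoop rest

def is_second_visit_available (path : List String) : Bool :=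
  let d := path.foldl (fun d cave =>
    if (is_big_cave cave == false) && !((PySem.Set.ofList ["start", "end"]).contains cave) then
      if d.contains cave = false then d.insert cave 1
      else d.modify cave 0 (fun v => v + 1)
    else d) (PySem.Dict.empty)
  pyCheckLoop d.items

-- ===== PORT B =====
-- outer 'while rel:' loop of Source B; the inner 'while' counts the leading run of rel[0]
-- (k = takeWhile length + 1), then 'rel = rel[k:]' drops that run (dropWhile)
def runScan : List String → Bool
  | [] => true
  | x :: rest =>
    let k := 1 + (rest.takeWhile (fun y => y == x)).length
    if k == 2 then false
    else runScan (rest.dropWhile (fun y => y == x))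
  termination_by l => l.length
  decreasing_by
    simp only [List.length_cons]
    exact Nat.lt_succ_of_le (List.Sublist.length_le (List.dropWhile_sublist _))

def is_second_visit_available_alt (path : List String) : Bool :=
  let rel := PySem.List.sorted (path.filter (fun cave =>
    !(cave == "start" || cave == "end") && cave.toList.any PySem.Chars.islower)) (fun x => x)
  runScan rel

-- ===== PRECONDITION & SPEC =====
def Spec_is_second_visit_available (path : List String) (out : Bool) : Prop := out = is_second_visit_available_alt path
instance (path : List String) (out : Bool) : Decidable (Spec_is_second_visit_available path out) := by unfold Spec_is_second_visit_available; infer_instance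

-- ===== CLAIM (what is proved, stated in full; the proofs are below) =====
def Claim_equal_is_second_visit_available : Prop := ∀ (path : List String), Dom_is_second_visit_available path → Spec_is_second_visit_available path (is_second_visit_available path)

-- ===== LEMMAS AND PROOFS =====

-- B's relevance predicate (definitionally the filter predicate of the alt port)
def pvRel (cave : String) : Bool :=
  !(cave == "start" || cave == "end") && cave.toList.any PySem.Chars.islower

lemma pyIsBigCaveLoop_eq (cs : List Char) :
    pyIsBigCaveLoop cs = !cs.any PySem.Chars.islower := by
  induction cs with
  | nil => rfl
  | cons c rest ih => by_cases h : PySem.Chars.islower c = true <;>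
      simp [pyIsBigCaveLoop, h, ih]

lemma relA_eq (cave : String) :
    ((is_big_cave cave == false) && !((PySem.Set.ofList ["start", "end"]).contains cave))
      = pvRel cave := by
  have hset : (PySem.Set.ofList ["start", "end"]).contains cave
      = (cave == "start" || cave == "end") := by
    have e1 : (cave == "start") = decide (cave = "start") := by
      by_cases h : cave = "start" <;> simp [h]
    have e2 : (cave == "end") = decide (cave = "end") := by
      by_cases h : cave = "end" <;> simp [h]
    simp [PySem.Set.ofList, PySem.Set.add, PySem.Set.contains, PySem.Set.empty, e1, e2]
  rw [hset]
  simp only [is_big_cave, pyIsBigCaveLoop_eq, pvRel]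
  cases h1 : (cave == "start" || cave == "end") <;>
    cases h2 : cave.toList.any PySem.Chars.islower <;> rfl

lemma modify_absent (d : PySem.Dict String Int) (k : String)
    (h : d.contains k = false) : d.modify k 0 (fun v => v + 1) = d.insert k 1 := by
  have h1 : d.modify k 0 (fun v => v + 1) = d.insert k (d.getD k 0 + 1) := by
    simp [PySem.Dict.modify]
  have h2 : d.getD k 0 = 0 := PySem.Dict.getD_of_not_contains d 0 h
  rw [h1, h2]
  norm_num

lemma dict_eq_counter (path : List String) :
    (path.foldl (fun d cave =>
      if (is_big_cave cave == false) && !((PySem.Set.ofList ["start", "end"]).contains cave) then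
        if d.contains cave = false then d.insert cave 1
        else d.modify cave 0 (fun v => v + 1)
      else d) (PySem.Dict.empty))
    = PySem.Dict.counter (path.filter pvRel) := by
  rw [PySem.Dict.counter_eq_foldl, List.foldl_filter]
  apply PySem.List.foldl_congr_mem
  intro d c _
  rw [relA_eq]
  by_cases hr : pvRel c = true
  · by_cases hc : PySem.Dict.contains d c = false
    · simp [hr, hc, modify_absent d c hc]
    · simp [hr, hc]
  · simp [hr]

lemma pyCheckLoop_eq (items : List (String × Int)) :
    pyCheckLoop items = !items.any (fun kv => kv.2 == 2) := by
  induction items with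
  | nil => rfl
  | cons p rest ih =>
    obtain ⟨k, v⟩ := p
    by_cases h : v = 2 <;> simp [pyCheckLoop, h, ih]

-- A's result, characterised on the filtered list: False iff some element occurs exactly twice
lemma A_char (path : List String) :
    is_second_visit_available path
      = !(path.filter pvRel).any (fun x => (path.filter pvRel).count x == 2) := by
  unfold is_second_visit_available
  rw [dict_eq_counter, pyCheckLoop_eq, PySem.Dict.items_counter, List.any_map,
    ← PySem.List.dedup_eq_ofList]
  congr 1
  rw [Bool.eq_iff_iff]
  simp only [List.any_eq_true, PySem.List.mem_dedup, Function.comp_apply, beq_iff_eq]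
  constructor
  · rintro ⟨x, hx, hcx⟩
    exact ⟨x, hx, by exact_mod_cast hcx⟩
  · rintro ⟨x, hx, hcx⟩
    exact ⟨x, hx, by exact_mod_cast hcx⟩

-- sortedness facts for B's run scan
lemma not_mem_dropWhile_beq (x : String) (rest : List String)
    (hp : (x :: rest).Pairwise (· ≤ ·)) : x ∉ rest.dropWhile (fun y => y == x) := by
  intro hx
  have hle : ∀ y ∈ rest, x ≤ y := (List.pairwise_cons.mp hp).1
  have hpr : (rest.dropWhile (fun y => y == x)).Pairwise (· ≤ ·) :=
    List.Pairwise.sublist (List.dropWhile_sublist _) (List.pairwise_cons.mp hp).2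
  cases hd : rest.dropWhile (fun y => y == x) with
  | nil => simp [hd] at hx
  | cons h d' =>
    have hne : (h == x) = false := by
      have := List.head_dropWhile_not (fun y => y == x) (l := rest) (by simp [hd])
      simpa [hd] using this
    rw [hd] at hx
    rcases List.mem_cons.mp hx with rfl | hx'
    · simp at hne
    · have h1 : h ≤ x := by
        rw [hd] at hpr
        exact (List.pairwise_cons.mp hpr).1 x hx'
      have h2 : x ≤ h := hle h (List.Sublist.mem (by rw [hd]; exact List.mem_cons_self) (List.dropWhile_sublist _))
      have : h = x := le_antisymm h1 h2
      simp [this] at hne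

lemma count_head_run (x : String) (rest : List String)
    (hnm : x ∉ rest.dropWhile (fun y => y == x)) :
    List.count x (x :: rest) = 1 + (rest.takeWhile (fun y => y == x)).length := by
  conv_lhs => rw [← List.takeWhile_append_dropWhile (p := fun y => y == x) (l := rest)]
  rw [show x :: (rest.takeWhile (fun y => y == x) ++ rest.dropWhile (fun y => y == x))
        = (x :: rest.takeWhile (fun y => y == x)) ++ rest.dropWhile (fun y => y == x) from rfl,
      List.count_append, List.count_eq_zero.mpr hnm]
  have : List.count x (x :: rest.takeWhile (fun y => y == x))
      = (x :: rest.takeWhile (fun y => y == x)).length := by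
    rw [List.count_eq_length]
    intro b hb
    rcases List.mem_cons.mp hb with rfl | hb'
    · rfl
    · have hbx := List.mem_takeWhile_imp hb'
      exact (beq_iff_eq.mp hbx).symm
  simp [this, Nat.add_comm]

lemma count_tail_run (x y : String) (rest : List String)
    (hy : y ∈ rest.dropWhile (fun z => z == x))
    (hnm : x ∉ rest.dropWhile (fun z => z == x)) :
    List.count y (x :: rest) = List.count y (rest.dropWhile (fun z => z == x)) := by
  have hyx : y ≠ x := fun h => hnm (h ▸ hy)
  conv_lhs => rw [← List.takeWhile_append_dropWhile (p := fun z => z == x) (l := rest)]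
  rw [show x :: (rest.takeWhile (fun z => z == x) ++ rest.dropWhile (fun z => z == x))
        = (x :: rest.takeWhile (fun z => z == x)) ++ rest.dropWhile (fun z => z == x) from rfl,
      List.count_append]
  have : List.count y (x :: rest.takeWhile (fun z => z == x)) = 0 := by
    rw [List.count_eq_zero]
    intro hmem
    rcases List.mem_cons.mp hmem with rfl | h'
    · exact hyx rfl
    · have hyx' := List.mem_takeWhile_imp h'
      exact hyx (beq_iff_eq.mp hyx')
  simp [this]

-- run-length correctness of B's scan on a sorted list
lemma runScan_sorted : ∀ (l : List String), l.Pairwise (· ≤ ·) →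
    runScan l = !l.any (fun x => l.count x == 2) := by
  intro l
  induction l using runScan.induct with
  | case1 => intro _; simp [runScan]
  | case2 x rest k hk2 =>
    intro hp
    have hnm := not_mem_dropWhile_beq x rest hp
    have hc : List.count x (x :: rest) = 2 := by
      rw [count_head_run x rest hnm]; simpa using hk2
    have hany : (x :: rest).any (fun y => List.count y (x :: rest) == 2) = true := by
      rw [List.any_eq_true]
      exact ⟨x, List.mem_cons_self, by simp [hc]⟩
    rw [hany]
    have hk2' : (1 + (List.takeWhile (fun y => y == x) rest).length == 2) = true := hk2
    simp only [runScan]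
    simp [hk2']
  | case3 x rest k hk2 ih =>
    intro hp
    have hnm := not_mem_dropWhile_beq x rest hp
    have hpd : (rest.dropWhile (fun y => y == x)).Pairwise (· ≤ ·) :=
      List.Pairwise.sublist (List.dropWhile_sublist _) (List.pairwise_cons.mp hp).2
    have hLHS : runScan (x :: rest) = runScan (rest.dropWhile (fun y => y == x)) := by
      have hk2' : ¬ (1 + (List.takeWhile (fun y => y == x) rest).length == 2) = true := hk2
      simp only [runScan]
      simp at hk2'
      simp [hk2']
    rw [hLHS, ih hpd]
    congr 1
    rw [Bool.eq_iff_iff]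
    simp only [List.any_eq_true]
    constructor
    · rintro ⟨y, hy, hcy⟩
      refine ⟨y, List.mem_cons.mpr ?_, ?_⟩
      · right; exact List.Sublist.mem hy (List.dropWhile_sublist _)
      · rwa [count_tail_run x y rest hy hnm]
    · rintro ⟨y, hy, hcy⟩
      by_cases hyx : y = x
      · subst hyx
        rw [count_head_run y rest hnm] at hcy
        simp at hcy
        exact absurd (show (1 + (List.takeWhile (fun z => z == y) rest).length == 2) = true
          by simp [hcy]) hk2
      · rcases List.mem_cons.mp hy with rfl | hy'
        · exact absurd rfl hyx
        · have : y ∈ rest.takeWhile (fun z => z == x) ++ rest.dropWhile (fun z => z == x) := by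
            rw [List.takeWhile_append_dropWhile]; exact hy'
          rcases List.mem_append.mp this with ht | hd
          · exact absurd (by simpa using List.mem_takeWhile_imp ht) hyx
          · exact ⟨y, hd, by rwa [count_tail_run x y rest hd hnm] at hcy⟩

-- ===== VERDICT (by name: the statement is the Claim_ definition above) =====
theorem is_second_visit_available_spec : Claim_equal_is_second_visit_available := by
  intro path _
  unfold Spec_is_second_visit_available is_second_visit_available_alt
  rw [A_char]
  have hfilter : (fun cave =>
      !(cave == "start" || cave == "end") && cave.toList.any PySem.Chars.islower) = pvRel := rfl
  rw [hfilter]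
  have hperm : (PySem.List.sorted (path.filter pvRel) (fun x => x)).Perm (path.filter pvRel) :=
    PySem.List.sorted_perm _ _ _
  rw [runScan_sorted _ (PySem.List.sorted_pairwise (path.filter pvRel) (fun x => x))]
  congr 1
  rw [Bool.eq_iff_iff]
  simp only [List.any_eq_true]
  constructor
  · rintro ⟨x, hx, hcx⟩
    exact ⟨x, hperm.mem_iff.mpr hx, by rwa [hperm.count_eq x]⟩
  · rintro ⟨x, hx, hcx⟩
    exact ⟨x, hperm.mem_iff.mp hx, by rwa [hperm.count_eq x] at hcx⟩
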